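-- pv_equiv track=rewrite | github.com/lhq-123/Spark-OneStop-DataPlatform | 项目代码/OneMake/Auto_Create_SparkTable/com/alex/utils/TableNameUtil.py | getTableNameList
-- ===== SOURCE A (Python) =====
-- def getTableNameList(fileNameList):
--     # 初始化全量表集合
--     fullTableList = []
--     # 初始化增量表集合
--     incrTableList = []
--     resultList = []
--     # 初始化布尔变量
--     isFull = True
--     for line in fileNameList:
--         if isFull:
--             if "@".__eq__(line):
--                 isFull = False
--                 continue
--             fullTableList.append(line)
--         else:
--             incrTableList.append(line)
--     resultList.append(fullTableList)
--     resultList.append(incrTableList)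
--     # 返回二维数组，包含全量和增量表名
--     return resultList
-- ===== SOURCE B (Python) =====
-- def getTableNameList(fileNameList):
--     # Locate-then-slice: find the first "@" separator and split there.
--     for i, x in enumerate(fileNameList):
--         if x == "@":
--             return [fileNameList[:i], fileNameList[i + 1:]]
--     return [list(fileNameList), []]
-- ===== Notes on version B (the rewrite author's own statement) =====
-- stated objective: simpler
-- what changed: Replaces the flag-driven per-element append loop with a locate-then-slice decomposition: find the index of the first "@" and return the two slices around it.
import Mathlib
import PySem

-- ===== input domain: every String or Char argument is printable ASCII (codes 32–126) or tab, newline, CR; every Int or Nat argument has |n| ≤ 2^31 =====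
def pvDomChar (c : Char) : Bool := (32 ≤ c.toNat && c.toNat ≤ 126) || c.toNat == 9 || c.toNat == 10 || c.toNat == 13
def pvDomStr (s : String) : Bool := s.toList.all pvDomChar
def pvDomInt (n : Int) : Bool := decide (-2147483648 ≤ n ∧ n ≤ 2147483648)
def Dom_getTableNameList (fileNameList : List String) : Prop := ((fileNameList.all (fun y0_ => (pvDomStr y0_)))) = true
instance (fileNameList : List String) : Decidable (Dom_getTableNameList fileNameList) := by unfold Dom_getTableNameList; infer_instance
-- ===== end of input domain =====

-- B replaces A's flag-driven append loop with locate-then-slice (find first "@", split there); objective: simpler.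


-- ===== PORT A =====
-- literal port of A: fold carrying (fullTableList, incrTableList, isFull)
def getTableNameList (fileNameList : List String) : List (List String) :=
  let st := fileNameList.foldl
    (fun (s : List String × List String × Bool) line =>
      if s.2.2 then
        if line = "@" then (s.1, s.2.1, false)
        else (s.1 ++ [line], s.2.1, true)
      else (s.1, s.2.1 ++ [line], false))
    ([], [], true)
  [st.1, st.2.1]

-- ===== PORT B =====
-- literal port of B: find the index of the first "@" (enumerate loop), slice around it
-- (slices fileNameList[:i] / fileNameList[i+1:] with 0 ≤ i < length are exactly take i / drop (i+1))
def getTableNameList_alt (fileNameList : List String) : List (List String) :=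
  match fileNameList.findIdx? (fun x => x = "@") with
  | some i => [fileNameList.take i, fileNameList.drop (i + 1)]
  | none => [fileNameList, []]

-- ===== PRECONDITION & SPEC =====
def Spec_getTableNameList (fileNameList : List String) (out : List (List String)) : Prop := out = getTableNameList_alt fileNameList
instance (fileNameList : List String) (out : List (List String)) : Decidable (Spec_getTableNameList fileNameList out) := by unfold Spec_getTableNameList; infer_instance

-- ===== CLAIM (what is proved, stated in full; the proofs are below) =====
def Claim_equal_getTableNameList : Prop := ∀ (fileNameList : List String), Dom_getTableNameList fileNameList → Spec_getTableNameList fileNameList (getTableNameList fileNameList)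

-- ===== LEMMAS AND PROOFS =====

-- once isFull is False, the loop only appends to the incremental list
theorem pv_loopF (l : List String) (full incr : List String) :
    l.foldl
      (fun (s : List String × List String × Bool) line =>
        if s.2.2 then
          if line = "@" then (s.1, s.2.1, false)
          else (s.1 ++ [line], s.2.1, true)
        else (s.1, s.2.1 ++ [line], false))
      (full, incr, false) = (full, incr ++ l, false) := by
  induction l generalizing incr with
  | nil => simp
  | cons x xs ih => simp [List.foldl_cons, ih]

-- while isFull is True, the loop's result is characterised by the first index of "@"
theorem pv_loopT (l : List String) (full incr : List String) :
    l.foldl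
      (fun (s : List String × List String × Bool) line =>
        if s.2.2 then
          if line = "@" then (s.1, s.2.1, false)
          else (s.1 ++ [line], s.2.1, true)
        else (s.1, s.2.1 ++ [line], false))
      (full, incr, true) =
    match l.findIdx? (fun x => x = "@") with
    | some i => (full ++ l.take i, incr ++ l.drop (i + 1), false)
    | none => (full ++ l, incr, true) := by
  induction l generalizing full with
  | nil => simp
  | cons x xs ih =>
    by_cases hx : x = "@"
    · simp [List.foldl_cons, hx, pv_loopF, List.findIdx?_cons]
    · rw [List.foldl_cons]
      have hstep : (if ((full, incr, true) : List String × List String × Bool).2.2 = true then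
          if x = "@" then ((full, incr, true).1, (full, incr, true).2.1, false)
          else ((full, incr, true).1 ++ [x], (full, incr, true).2.1, true)
        else ((full, incr, true).1, (full, incr, true).2.1 ++ [x], false))
          = ((full ++ [x], incr, true) : List String × List String × Bool) := by simp [hx]
      rw [hstep, ih (full ++ [x]), List.findIdx?_cons]
      cases h : xs.findIdx? (fun x => x = "@") with
      | none => simp [hx]
      | some i => simp [hx]

-- ===== VERDICT (by name: the statement is the Claim_ definition above) =====
theorem getTableNameList_spec : Claim_equal_getTableNameList := by
  intro l _
  unfold Spec_getTableNameList getTableNameList getTableNameList_alt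
  rw [pv_loopT]
  cases h : l.findIdx? (fun x => x = "@") with
  | none => simp
  | some i => simp
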